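-- pv_equiv track=rewrite | github.com/intel/neural-compressor | examples/pytorch/object_detection/ssd_resnet34/quantization/ptq/ipex/infer_weight_sharing.py | get_bs_per_stream
-- ===== SOURCE A (Python) =====
-- def get_bs_per_stream(batch_size, stream_number):
--     # Follow the logic of multi stream module
--     result = []
--     batch_per_instance = batch_size // stream_number
--
--     if batch_per_instance >= 1:
--         # The input batchsize larger or equal to num_streams.
--         used_num_streams = stream_number
--         # If input batchsize larger than num_streams and not divisible,
--         # the first remainder streams will have (mini_batch + 1) input size.
--         instance_need_extra_input = batch_size % stream_number
--     else:
--         # The input batchsize less than num_streams,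
--         # only the first batchsize stream will have mini_batch(1) input.
--         batch_per_instance = 1
--         used_num_streams = batch_size
--         instance_need_extra_input = 0
--     start_idx = 0
--     end_idx = 0
--     for j in range(used_num_streams):
--         if j < instance_need_extra_input:
--             # Tail case, when the input image size larger than num_streams and not divisible,
--             # the first remainder streams will have (mini_batch + 1) input size.
--             end_idx = end_idx + (batch_per_instance + 1)
--         else:
--             # Input image size divisible of num_streams or input image size less than num_streams.
--             end_idx = end_idx + batch_per_instance
--         result.append(end_idx-start_idx)
--         start_idx = end_idx
--     return result
-- ===== SOURCE B (Python) =====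
-- def get_bs_per_stream(batch_size, stream_number):
--     batch_per_instance = batch_size // stream_number
--     if batch_per_instance >= 1:
--         used_num_streams = stream_number
--         instance_need_extra_input = batch_size % stream_number
--     else:
--         batch_per_instance = 1
--         used_num_streams = batch_size
--         instance_need_extra_input = 0
--     return ([batch_per_instance + 1] * instance_need_extra_input
--             + [batch_per_instance] * (used_num_streams - instance_need_extra_input))
-- ===== Notes on version B (the rewrite author's own statement) =====
-- stated objective: simpler
-- what changed: Replaces the start_idx/end_idx accumulate-then-diff loop with a closed-form count-based construction [bpi+1]*extra + [bpi]*(used-extra), dropping the accumulator and per-element append.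
import Mathlib
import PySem

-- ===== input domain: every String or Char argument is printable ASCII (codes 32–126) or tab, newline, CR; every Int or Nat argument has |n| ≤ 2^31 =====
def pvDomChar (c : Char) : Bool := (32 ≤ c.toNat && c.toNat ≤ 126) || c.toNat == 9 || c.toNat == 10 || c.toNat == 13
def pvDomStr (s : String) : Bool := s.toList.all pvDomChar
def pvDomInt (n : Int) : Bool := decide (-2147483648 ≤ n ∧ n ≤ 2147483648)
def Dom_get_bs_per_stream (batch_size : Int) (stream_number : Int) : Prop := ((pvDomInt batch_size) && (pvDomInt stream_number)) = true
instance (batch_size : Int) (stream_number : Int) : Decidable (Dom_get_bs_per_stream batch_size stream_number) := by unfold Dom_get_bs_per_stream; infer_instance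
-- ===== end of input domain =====

-- B replaces A's start_idx/end_idx accumulator loop with a closed-form count-based concatenation (simpler).

-- ===== PORT A =====
-- the for-j loop over range(used_num_streams), carrying (result, start_idx, end_idx)
def pvLoopA (bpi extra : Int) : List Int → List Int → Int → Int → List Int
  | [], res, _, _ => res
  | j :: js, res, s, e =>
    let e' := if j < extra then e + (bpi + 1) else e + bpi
    pvLoopA bpi extra js (res ++ [e' - s]) e' e'

def get_bs_per_stream (batch_size : Int) (stream_number : Int) : List Int :=
  let bpi := PySem.Int.floordiv batch_size stream_number
  if bpi ≥ 1 then
    pvLoopA bpi (PySem.Int.mod batch_size stream_number)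
      (PySem.List.pyRange 0 stream_number 1) [] 0 0
  else
    pvLoopA 1 0 (PySem.List.pyRange 0 batch_size 1) [] 0 0

-- ===== PORT B =====
-- Python list multiplication [x] * n (n ≤ 0 gives []) is List.replicate n.toNat x
def get_bs_per_stream_alt (batch_size : Int) (stream_number : Int) : List Int :=
  let bpi := PySem.Int.floordiv batch_size stream_number
  if bpi ≥ 1 then
    let used := stream_number
    let extra := PySem.Int.mod batch_size stream_number
    List.replicate extra.toNat (bpi + 1) ++ List.replicate (used - extra).toNat bpi
  else
    let bpi' : Int := 1
    let used := batch_size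
    let extra : Int := 0
    List.replicate extra.toNat (bpi' + 1) ++ List.replicate (used - extra).toNat bpi'

-- ===== PRECONDITION & SPEC =====
-- Pre_ excludes exactly stream_number = 0, where Python A raises ZeroDivisionError.
def Pre_get_bs_per_stream (batch_size : Int) (stream_number : Int) : Prop := stream_number ≠ 0
instance (batch_size : Int) (stream_number : Int) : Decidable (Pre_get_bs_per_stream batch_size stream_number) := by unfold Pre_get_bs_per_stream; infer_instance
def pvWitness_get_bs_per_stream : Int × Int := (10, 3)

def Spec_get_bs_per_stream (batch_size : Int) (stream_number : Int) (out : List Int) : Prop := out = get_bs_per_stream_alt batch_size stream_number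
instance (batch_size : Int) (stream_number : Int) (out : List Int) : Decidable (Spec_get_bs_per_stream batch_size stream_number out) := by unfold Spec_get_bs_per_stream; infer_instance

-- ===== CLAIM (what is proved, stated in full; the proofs are below) =====
def Claim_equal_get_bs_per_stream : Prop := ∀ (batch_size : Int) (stream_number : Int), Dom_get_bs_per_stream batch_size stream_number → Pre_get_bs_per_stream batch_size stream_number → Spec_get_bs_per_stream batch_size stream_number (get_bs_per_stream batch_size stream_number)

-- ===== LEMMAS AND PROOFS =====

-- A's loop keeps start_idx = end_idx at each iteration head, so each appended value
-- is exactly the increment: the loop is a map over the index list.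
theorem pvLoopA_eq_map (bpi extra : Int) :
    ∀ (js : List Int) (res : List Int) (s : Int),
      pvLoopA bpi extra js res s s
        = res ++ js.map (fun j => if j < extra then bpi + 1 else bpi) := by
  intro js
  induction js with
  | nil => intro res s; simp [pvLoopA]
  | cons j js ih =>
    intro res s
    simp only [pvLoopA, List.map_cons]
    by_cases h : j < extra
    · simp [h, ih]
    · simp [h, ih]

-- the closed form of the map over range(0, n) when 0 ≤ e ≤ n
theorem map_range_ite (x y e n : Int) (he : 0 ≤ e) (hen : e ≤ n) :
    (PySem.List.pyRange 0 n 1).map (fun j => if j < e then x else y)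
      = List.replicate e.toNat x ++ List.replicate (n - e).toNat y := by
  rw [PySem.List.pyRange_one_append 0 e n he hen, List.map_append]
  congr 1
  · rw [List.eq_replicate_iff]
    constructor
    · simp [PySem.List.length_pyRange_one]
    · intro b hb
      simp only [List.mem_map] at hb
      obtain ⟨j, hj, rfl⟩ := hb
      rw [PySem.List.mem_pyRange_one] at hj
      simp [hj.2]
  · rw [List.eq_replicate_iff]
    constructor
    · simp [PySem.List.length_pyRange_one]
    · intro b hb
      simp only [List.mem_map] at hb
      obtain ⟨j, hj, rfl⟩ := hb
      rw [PySem.List.mem_pyRange_one] at hj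
      simp [not_lt.mpr hj.1]

-- ===== VERDICT (by name: the statement is the Claim_ definition above) =====
theorem get_bs_per_stream_spec : Claim_equal_get_bs_per_stream := by
  intro bs sn _ hpre
  unfold Spec_get_bs_per_stream get_bs_per_stream get_bs_per_stream_alt
  simp only []
  by_cases hb : PySem.Int.floordiv bs sn ≥ 1
  · simp only [hb, if_pos]
    rw [pvLoopA_eq_map]
    rcases lt_or_gt_of_ne hpre with hneg | hpos
    · -- sn < 0: range empty, and both replicate counts are 0
      have hbnd := PySem.Int.mod_neg_bounds (a:=bs) (b:=sn) hneg
      rw [PySem.List.pyRange_one_eq_nil (by omega)]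
      have h1 : (PySem.Int.mod bs sn).toNat = 0 := by omega
      have h2 : (sn - PySem.Int.mod bs sn).toNat = 0 := by omega
      simp [h1, h2]
    · -- sn > 0: 0 ≤ bs % sn < sn
      have h0 := PySem.Int.mod_nonneg (a:=bs) (b:=sn) hpos
      have h1 := PySem.Int.mod_lt (a:=bs) (b:=sn) hpos
      rw [map_range_ite _ _ _ _ h0 (le_of_lt h1)]
      simp
  · simp only [hb, if_neg, not_false_iff]
    rw [pvLoopA_eq_map]
    by_cases hbs : 0 ≤ bs
    · rw [map_range_ite (1 + 1) 1 0 bs le_rfl hbs]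
      simp
    · have hle : bs ≤ 0 := by omega
      have hnil : PySem.List.pyRange 0 bs 1 = [] := PySem.List.pyRange_one_eq_nil hle
      rw [hnil]
      simp
      omega
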